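-- pv_equiv track=rewrite | github.com/n1c0p/AdventOfCode | 2025/python/src/day_9.py | largest_inside
-- ===== SOURCE A (Python) =====
-- def intersect(edges: list[tuple[int, int, int, int]], x1:int, y1:int, x2:int, y2:int) -> bool:
--     for edge in edges:
--         if x1 < edge[2] and x2 > edge[0] and y1 < edge[3] and y2 > edge[1]:
--             return True
--     return False
--
-- def largest_inside(edges: list[tuple[int, int, int, int]], tiles: list[tuple[int,int]]) -> int:
--     best = 0
--     for n, xy1 in enumerate(tiles[:-1]):
--         for xy2 in tiles[n + 1:]:
--             x1, x2 = (xy1[0], xy2[0]) if xy1[0] < xy2[0] else (xy2[0], xy1[0])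
--             y1, y2 = (xy1[1], xy2[1]) if xy1[1] < xy2[1] else (xy2[1], xy1[1])
--             area = (x2 - x1 + 1) * (y2 - y1 + 1)
--             if area > best and not intersect(edges, x1, y1, x2, y2):
--                 best = area
--     return best
-- ===== SOURCE B (Python) =====
-- def intersect(edges: list[tuple[int, int, int, int]], x1: int, y1: int, x2: int, y2: int) -> bool:
--     for edge in edges:
--         if x1 < edge[2] and x2 > edge[0] and y1 < edge[3] and y2 > edge[1]:
--             return True
--     return False
--
--
-- def largest_inside(edges: list[tuple[int, int, int, int]], tiles: list[tuple[int, int]]) -> int: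
--     # Build every candidate rectangle once, sort by area descending,
--     # and return the area of the first one that does not intersect any edge.
--     cands = []
--     for n, xy1 in enumerate(tiles):
--         for xy2 in tiles[n + 1:]:
--             x1, x2 = (xy1[0], xy2[0]) if xy1[0] < xy2[0] else (xy2[0], xy1[0])
--             y1, y2 = (xy1[1], xy2[1]) if xy1[1] < xy2[1] else (xy2[1], xy1[1])
--             cands.append(((x2 - x1 + 1) * (y2 - y1 + 1), x1, y1, x2, y2))
--     cands.sort(key=lambda c: c[0], reverse=True)
--     for area, x1, y1, x2, y2 in cands:
--         if not intersect(edges, x1, y1, x2, y2):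
--             return area
--     return 0
-- ===== Notes on version B (the rewrite author's own statement) =====
-- stated objective: alternative
-- what changed: Instead of a pruned running-max over nested pair loops, B materialises all candidate rectangles as (area,x1,y1,x2,y2) tuples, sorts them by area descending, and returns the area of the first candidate that intersects no edge (0 if none).
import Mathlib
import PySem

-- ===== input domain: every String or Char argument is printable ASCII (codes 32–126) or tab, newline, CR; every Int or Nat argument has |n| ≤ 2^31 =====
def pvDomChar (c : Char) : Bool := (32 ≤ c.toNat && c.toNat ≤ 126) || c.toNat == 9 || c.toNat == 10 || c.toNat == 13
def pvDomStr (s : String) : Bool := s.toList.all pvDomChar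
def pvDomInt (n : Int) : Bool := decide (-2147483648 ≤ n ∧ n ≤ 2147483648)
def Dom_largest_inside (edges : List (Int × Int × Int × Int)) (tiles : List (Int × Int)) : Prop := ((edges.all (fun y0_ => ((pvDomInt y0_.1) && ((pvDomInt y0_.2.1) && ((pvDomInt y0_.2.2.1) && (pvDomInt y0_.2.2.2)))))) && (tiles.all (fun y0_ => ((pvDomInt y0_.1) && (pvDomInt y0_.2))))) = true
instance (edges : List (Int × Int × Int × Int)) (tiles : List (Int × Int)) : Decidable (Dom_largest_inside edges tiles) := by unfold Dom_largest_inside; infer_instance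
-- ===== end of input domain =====

-- B replaces A's pruned running-max over nested pair loops by: build all candidate
-- rectangles, sort by area descending, return the first non-intersecting one (alternative decomposition).

-- ===== PORT A =====
-- shared helper `intersect` (byte-for-byte identical in Source A and Source B)
def pvIntersect (edges : List (Int × Int × Int × Int)) (x1 y1 x2 y2 : Int) : Bool :=
  edges.any (fun e => x1 < e.2.2.1 && x2 > e.1 && y1 < e.2.2.2 && y2 > e.2.1)

def largest_inside (edges : List (Int × Int × Int × Int)) (tiles : List (Int × Int)) : Int :=
  (PySem.List.enumerate (PySem.List.slice tiles none (some (-1))) 0).foldl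
    (fun best p =>
      (PySem.List.slice tiles (some (p.1 + 1)) none).foldl
        (fun best xy2 =>
          let xy1 := p.2
          let xp := if xy1.1 < xy2.1 then (xy1.1, xy2.1) else (xy2.1, xy1.1)
          let yp := if xy1.2 < xy2.2 then (xy1.2, xy2.2) else (xy2.2, xy1.2)
          let area := (xp.2 - xp.1 + 1) * (yp.2 - yp.1 + 1)
          if best < area ∧ pvIntersect edges xp.1 yp.1 xp.2 yp.2 = false then area else best)
        best)
    0

-- ===== PORT B =====
-- candidate tuple (area, x1, y1, x2, y2) appended by Source B's inner loop
def pvRect (xy1 xy2 : Int × Int) : Int × Int × Int × Int × Int :=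
  let xp := if xy1.1 < xy2.1 then (xy1.1, xy2.1) else (xy2.1, xy1.1)
  let yp := if xy1.2 < xy2.2 then (xy1.2, xy2.2) else (xy2.2, xy1.2)
  ((xp.2 - xp.1 + 1) * (yp.2 - yp.1 + 1), xp.1, yp.1, xp.2, yp.2)

def pvCands (tiles : List (Int × Int)) : List (Int × Int × Int × Int × Int) :=
  (PySem.List.enumerate tiles 0).foldl
    (fun acc p =>
      (PySem.List.slice tiles (some (p.1 + 1)) none).foldl
        (fun acc xy2 => acc ++ [pvRect p.2 xy2]) acc)
    []

-- Source B's final loop: first candidate (in sorted order) that intersects no edge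
def pvFirstFit (edges : List (Int × Int × Int × Int)) : List (Int × Int × Int × Int × Int) → Int
  | [] => 0
  | c :: t =>
      if pvIntersect edges c.2.1 c.2.2.1 c.2.2.2.1 c.2.2.2.2 = false then c.1
      else pvFirstFit edges t

def largest_inside_alt (edges : List (Int × Int × Int × Int)) (tiles : List (Int × Int)) : Int :=
  pvFirstFit edges (PySem.List.sorted (pvCands tiles) (fun c => c.1) true)

-- ===== PRECONDITION & SPEC =====
def Spec_largest_inside (edges : List (Int × Int × Int × Int)) (tiles : List (Int × Int)) (out : Int) : Prop := out = largest_inside_alt edges tiles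
instance (edges : List (Int × Int × Int × Int)) (tiles : List (Int × Int)) (out : Int) : Decidable (Spec_largest_inside edges tiles out) := by unfold Spec_largest_inside; infer_instance

-- ===== CLAIM (what is proved, stated in full; the proofs are below) =====
def Claim_equal_largest_inside : Prop := ∀ (edges : List (Int × Int × Int × Int)) (tiles : List (Int × Int)), Dom_largest_inside edges tiles → Spec_largest_inside edges tiles (largest_inside edges tiles)

-- ===== LEMMAS AND PROOFS =====

-- running-max step used as the common denominator of both programs
def pvG (edges : List (Int × Int × Int × Int)) (b : Int) (c : Int × Int × Int × Int × Int) : Int :=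
  if pvIntersect edges c.2.1 c.2.2.1 c.2.2.2.1 c.2.2.2.2 = false then max b c.1 else b

-- all unordered pairs of tiles, as candidate rectangles, in generation order
def pvPairs : List (Int × Int) → List (Int × Int × Int × Int × Int)
  | [] => []
  | x :: t => t.map (pvRect x) ++ pvPairs t

theorem pvBodyEq (edges : List (Int × Int × Int × Int)) (xy1 : Int × Int) :
    (fun (best : Int) (xy2 : Int × Int) =>
      let xp := if xy1.1 < xy2.1 then (xy1.1, xy2.1) else (xy2.1, xy1.1)
      let yp := if xy1.2 < xy2.2 then (xy1.2, xy2.2) else (xy2.2, xy1.2)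
      let area := (xp.2 - xp.1 + 1) * (yp.2 - yp.1 + 1)
      if best < area ∧ pvIntersect edges xp.1 yp.1 xp.2 yp.2 = false then area else best)
    = fun (b : Int) (xy2 : Int × Int) => pvG edges b (pvRect xy1 xy2) := by
  funext b xy2
  simp only [pvG, pvRect]
  split_ifs <;> simp_all <;> omega

theorem pvEnumerate_append_singleton {α : Type} (l : List α) (y : α) :
    ∀ s : Int, PySem.List.enumerate (l ++ [y]) s
      = PySem.List.enumerate l s ++ [(s + l.length, y)] := by
  induction l with
  | nil => intro s; simp [PySem.List.enumerate]
  | cons x t ih =>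
      intro s
      have h : s + 1 + (t.length : Int) = s + ((t.length + 1 : Nat) : Int) := by push_cast; ring
      simp only [List.cons_append, PySem.List.enumerate, ih (s + 1), h, List.length_cons]

theorem pvNestedFold (edges : List (Int × Int × Int × Int)) (tiles : List (Int × Int)) :
    ∀ (xs : List (Int × Int)) (s : Nat) (acc : Int), tiles.drop s = xs →
      (PySem.List.enumerate xs (s : Int)).foldl
        (fun b p => (PySem.List.slice tiles (some (p.1 + 1)) none).foldl
            (fun b xy2 => pvG edges b (pvRect p.2 xy2)) b)
        acc
      = (pvPairs xs).foldl (pvG edges) acc := by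
  intro xs
  induction xs with
  | nil => intro s acc h; simp [PySem.List.enumerate, pvPairs]
  | cons x t ih =>
      intro s acc h
      have hdrop : tiles.drop (s + 1) = t := by
        rw [← List.drop_drop, h]; simp
      have hs : ((s : Int) + 1) = ((s + 1 : Nat) : Int) := by push_cast; ring
      simp only [PySem.List.enumerate, List.foldl_cons]
      rw [hs, PySem.List.slice_from _ (by positivity), Int.toNat_natCast, hdrop]
      rw [ih (s + 1) _ hdrop]
      simp only [pvPairs, List.foldl_append, List.foldl_map]

theorem pvCands_eq (tiles : List (Int × Int)) : pvCands tiles = pvPairs tiles := by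
  suffices h : ∀ (xs : List (Int × Int)) (s : Nat) (acc : List (Int × Int × Int × Int × Int)),
      tiles.drop s = xs →
      (PySem.List.enumerate xs (s : Int)).foldl
        (fun acc p => (PySem.List.slice tiles (some (p.1 + 1)) none).foldl
            (fun acc xy2 => acc ++ [pvRect p.2 xy2]) acc)
        acc
      = acc ++ pvPairs xs by
    have := h tiles 0 [] (by simp)
    simpa [pvCands] using this
  intro xs
  induction xs with
  | nil => intro s acc h; simp [PySem.List.enumerate, pvPairs]
  | cons x t ih =>
      intro s acc h
      have hdrop : tiles.drop (s + 1) = t := by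
        rw [← List.drop_drop, h]; simp
      have hs : ((s : Int) + 1) = ((s + 1 : Nat) : Int) := by push_cast; ring
      simp only [PySem.List.enumerate, List.foldl_cons]
      rw [hs, PySem.List.slice_from _ (by positivity), Int.toNat_natCast, hdrop]
      rw [ih (s + 1) _ hdrop]
      rw [PySem.List.foldl_append_singleton_eq_map]
      simp [pvPairs]

theorem pvFold_perm (edges : List (Int × Int × Int × Int))
    {l₁ l₂ : List (Int × Int × Int × Int × Int)} (h : l₁.Perm l₂) :
    ∀ b, l₁.foldl (pvG edges) b = l₂.foldl (pvG edges) b := by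
  induction h with
  | nil => intro b; rfl
  | cons x _ ih => intro b; simp only [List.foldl_cons, ih]
  | swap x y l =>
      intro b
      simp only [List.foldl_cons]
      congr 1
      simp only [pvG]; split_ifs <;> omega
  | trans _ _ ih₁ ih₂ => intro b; rw [ih₁, ih₂]

theorem pvFold_const (edges : List (Int × Int × Int × Int))
    (t : List (Int × Int × Int × Int × Int)) :
    ∀ b, (∀ c ∈ t, c.1 ≤ b) → t.foldl (pvG edges) b = b := by
  induction t with
  | nil => intro b _; rfl
  | cons c t ih =>
      intro b hb
      have hc : c.1 ≤ b := hb c (by simp)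
      have hg : pvG edges b c = b := by
        simp only [pvG]; split_ifs <;> omega
      simp only [List.foldl_cons, hg]
      exact ih b (fun d hd => hb d (by simp [hd]))

theorem pvFirstFit_eq_fold (edges : List (Int × Int × Int × Int))
    (l : List (Int × Int × Int × Int × Int))
    (hp : l.Pairwise (fun a b => b.1 ≤ a.1)) (hpos : ∀ c ∈ l, 1 ≤ c.1) :
    pvFirstFit edges l = l.foldl (pvG edges) 0 := by
  induction l with
  | nil => rfl
  | cons c t ih =>
      have hle : ∀ d ∈ t, d.1 ≤ c.1 := (List.pairwise_cons.mp hp).1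
      have hc : 1 ≤ c.1 := hpos c (by simp)
      by_cases hv : pvIntersect edges c.2.1 c.2.2.1 c.2.2.2.1 c.2.2.2.2 = false
      · simp only [pvFirstFit, hv, if_pos, List.foldl_cons]
        have hg : pvG edges 0 c = c.1 := by simp only [pvG, hv, if_pos]; omega
        rw [hg, pvFold_const edges t c.1 hle]
      · simp only [pvFirstFit, hv, List.foldl_cons]
        have hg : pvG edges 0 c = 0 := by simp only [pvG, hv]; simp
        rw [if_neg (by simp), hg]
        exact ih (List.Pairwise.of_cons hp) (fun d hd => hpos d (by simp [hd]))

theorem pvRect_pos (a b : Int × Int) : 1 ≤ (pvRect a b).1 := by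
  simp only [pvRect]
  split_ifs <;> nlinarith

theorem pvPairs_pos (tiles : List (Int × Int)) : ∀ c ∈ pvPairs tiles, 1 ≤ c.1 := by
  induction tiles with
  | nil => intro c hc; simp [pvPairs] at hc
  | cons x t ih =>
      intro c hc
      simp only [pvPairs, List.mem_append, List.mem_map] at hc
      rcases hc with ⟨y, _, rfl⟩ | hc
      · exact pvRect_pos x y
      · exact ih c hc

-- fold over enumerate(tiles[:-1]) equals fold over enumerate(tiles): the last tile's inner slice is empty
theorem pvDropLast_enum_fold (edges : List (Int × Int × Int × Int)) (tiles : List (Int × Int)) (acc : Int) :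
    (PySem.List.enumerate tiles.dropLast 0).foldl
      (fun b p => (PySem.List.slice tiles (some (p.1 + 1)) none).foldl
          (fun b xy2 => pvG edges b (pvRect p.2 xy2)) b) acc
    = (PySem.List.enumerate tiles 0).foldl
      (fun b p => (PySem.List.slice tiles (some (p.1 + 1)) none).foldl
          (fun b xy2 => pvG edges b (pvRect p.2 xy2)) b) acc := by
  rcases List.eq_nil_or_concat tiles with rfl | ⟨l, y, rfl⟩
  · rfl
  · simp only [List.concat_eq_append]
    have hdl : (l ++ [y]).dropLast = l := by simp
    rw [hdl, pvEnumerate_append_singleton l y 0, List.foldl_append]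
    have hslice : PySem.List.slice (l ++ [y]) (some ((l.length : Int) + 1)) none = [] := by
      rw [show ((l.length : Int) + 1) = ((l.length + 1 : Nat) : Int) by push_cast; ring]
      rw [PySem.List.slice_from _ (by positivity), Int.toNat_natCast]
      apply List.drop_eq_nil_of_le
      simp
    simp only [List.foldl_cons, List.foldl_nil]
    rw [show ((0 : Int) + (l.length : Int) + 1) = ((l.length : Int) + 1) by ring, hslice]
    simp

-- ===== VERDICT (by name: the statement is the Claim_ definition above) =====
theorem largest_inside_spec : Claim_equal_largest_inside := by
  intro edges tiles _
  unfold Spec_largest_inside largest_inside largest_inside_alt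
  rw [PySem.List.slice_to_neg_one]
  simp only [pvBodyEq edges]
  rw [pvDropLast_enum_fold]
  have hnest := pvNestedFold edges tiles tiles 0 0 (by simp)
  simp only [Nat.cast_zero] at hnest
  rw [hnest, pvCands_eq]
  have hperm : (PySem.List.sorted (pvPairs tiles) (fun c => c.1) true).Perm (pvPairs tiles) :=
    PySem.List.sorted_perm _ _ _
  rw [← pvFold_perm edges hperm 0]
  rw [pvFirstFit_eq_fold edges _ (PySem.List.sorted_pairwise_rev _ _)
    (fun c hc => pvPairs_pos tiles c ((PySem.List.mem_sorted _ _ _ _).mp hc))]
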